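-- pv_equiv track=rewrite | github.com/seonjaechoi0307/TIL | Self-Study/Code_Test/School_Programers_Traning/2023-11-25.py | solution
-- ===== SOURCE A (Python) =====
-- def solution(myString):
--
--     # 솔루션 정의
--     # 알파벳 소문자로 이루어진 문자열 myString이 주어집니다.
--     # 알파벳 순서에서 "l"보다 앞서는 모든 문자를 "l"로 바꾼 문자열을 return
--
--     # 로직 구상
--     # 알파벳은 ASCII 코드에 따라 숫자가 정해져있어 비교가 가능하다.
--     # EX) a = 97, b = 98 ... z = 122
--     answer = ''
--
--     for char in myString :
--         if char < 'l' :
--             answer += 'l'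
--         else :
--             answer += char
--
--     return answer
-- ===== SOURCE B (Python) =====
-- def solution(myString):
--     # Run-based rewrite: replace each maximal run of sub-'l' characters wholesale
--     # with 'l' * (run length), keeping the separating characters (>= 'l') as-is.
--     parts = []
--     i = 0
--     n = len(myString)
--     while i < n:
--         j = i
--         while j < n and myString[j] < 'l':
--             j += 1
--         parts.append('l' * (j - i))
--         if j < n:
--             parts.append(myString[j])
--         i = j + 1
--     return ''.join(parts)
-- ===== Notes on version B (the rewrite author's own statement) =====
-- stated objective: alternative
-- what changed: Replaces the per-character branch-and-concatenate loop with a two-pointer run scanner that replaces each maximal run of sub-'l' characters wholesale by 'l'*(run length) and joins the collected pieces once.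
import Mathlib
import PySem

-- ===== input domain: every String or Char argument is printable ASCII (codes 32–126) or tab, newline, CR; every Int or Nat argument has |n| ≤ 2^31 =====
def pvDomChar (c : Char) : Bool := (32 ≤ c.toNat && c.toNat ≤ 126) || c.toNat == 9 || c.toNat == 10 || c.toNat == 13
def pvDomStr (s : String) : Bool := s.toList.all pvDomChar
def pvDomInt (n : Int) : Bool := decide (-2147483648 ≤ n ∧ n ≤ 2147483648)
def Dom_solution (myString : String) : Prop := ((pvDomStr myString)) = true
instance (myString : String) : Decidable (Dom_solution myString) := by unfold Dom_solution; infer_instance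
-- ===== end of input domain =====

-- B scans maximal runs of sub-'l' characters with two pointers and replaces each run
-- wholesale by 'l' * (run length), joining the pieces once (alternative decomposition).

-- ===== PORT A =====
def solution (myString : String) : String :=
  String.mk (myString.toList.foldl
    (fun answer char => answer ++ (if char < 'l' then ['l'] else [char])) [])

-- ===== PORT B =====
-- the outer while loop of Source B: the inner while scans the maximal run of chars < 'l'
-- (takeWhile/dropWhile = the j-scan); emit 'l' * (run length), then the separating
-- char myString[j] (if any), and continue from i = j + 1
def pvParts (l : List Char) : List (List Char) :=
  match h : l.dropWhile (fun c => c < 'l') with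
  | [] => [List.replicate (l.takeWhile (fun c => c < 'l')).length 'l']
  | c :: t =>
    List.replicate (l.takeWhile (fun c => c < 'l')).length 'l' :: [c] :: pvParts t
termination_by l.length
decreasing_by
  have := List.length_dropWhile_le (p := fun c => decide (c < 'l')) (l := l)
  rw [h] at this
  simp at this
  omega

-- ''.join(parts)
def solution_alt (myString : String) : String :=
  String.mk (pvParts myString.toList).flatten

-- ===== PRECONDITION & SPEC =====
def Spec_solution (myString : String) (out : String) : Prop := out = solution_alt myString
instance (myString : String) (out : String) : Decidable (Spec_solution myString out) := by unfold Spec_solution; infer_instance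

-- ===== CLAIM (what is proved, stated in full; the proofs are below) =====
def Claim_equal_solution : Prop := ∀ (myString : String), Dom_solution myString → Spec_solution myString (solution myString)

-- ===== LEMMAS AND PROOFS =====

lemma map_takeWhile_replicate (L : List Char) :
    (L.takeWhile (fun c => c < 'l')).map (fun c => if c < 'l' then 'l' else c) =
      List.replicate (L.takeWhile (fun c => c < 'l')).length 'l' := by
  rw [List.eq_replicate_iff]
  refine ⟨by simp, ?_⟩
  intro b hb
  rcases List.mem_map.mp hb with ⟨c, hc, rfl⟩
  have h1 : (fun c => decide (c < 'l')) c = true :=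
    List.mem_takeWhile_imp (p := fun c => decide (c < 'l')) hc
  simp only [decide_eq_true_eq] at h1
  simp [h1]

lemma pvParts_flatten_aux : ∀ (n : Nat) (L : List Char), L.length ≤ n →
    (pvParts L).flatten = L.map (fun c => if c < 'l' then 'l' else c) := by
  intro n
  induction n with
  | zero =>
    intro L hL
    have : L = [] := List.eq_nil_of_length_eq_zero (Nat.le_zero.mp hL)
    subst this
    simp [pvParts]
  | succ n ih =>
    intro L hL
    rw [pvParts]
    split
    · rename_i heq
      have hsplit := List.takeWhile_append_dropWhile (p := fun c => decide (c < 'l')) (l := L)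
      rw [heq, List.append_nil] at hsplit
      conv_rhs => rw [← hsplit]
      rw [map_takeWhile_replicate]
      simp
    · rename_i c t heq
      have hsplit := List.takeWhile_append_dropWhile (p := fun c => decide (c < 'l')) (l := L)
      rw [heq] at hsplit
      have hc : ¬ c < 'l' := by
        have h2 := List.head?_dropWhile_not (p := fun c => decide (c < 'l')) (l := L)
        rw [heq] at h2
        simpa using h2
      have ht : t.length ≤ n := by
        have := congrArg List.length hsplit
        simp at this
        omega
      conv_rhs => rw [← hsplit]
      rw [List.map_append, map_takeWhile_replicate]
      simp [hc, ih t ht]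

-- ===== VERDICT (by name: the statement is the Claim_ definition above) =====
theorem solution_spec : Claim_equal_solution := by
  intro s _
  unfold Spec_solution solution solution_alt
  rw [PySem.List.foldl_append_eq_flatMap, List.nil_append,
      pvParts_flatten_aux s.toList.length s.toList (Nat.le_refl _)]
  congr 1
  induction s.toList with
  | nil => rfl
  | cons c t ih =>
    simp only [List.flatMap_cons, List.map_cons, ih]
    split_ifs <;> rfl
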